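-- pv_equiv track=rewrite | github.com/xiaoyueli/MOOC | DatastructureAndAlgorithm/DataStructure-ZhejiangU(20160229-20160603)/week5_RoadInHeap.py | insert_item
-- ===== SOURCE A (Python) =====
-- def insert_item(heap, value):
--
--     if not heap:
--         heap.append(value)
--         return heap
--     else:
--         heap.append(value)
--         idx = len(heap)
--         heap.insert(0, None)
--         parent = idx // 2
--         if value < heap[parent]:
--             while parent != 0 and value < heap[parent]:
--                 heap[idx] = heap[parent]
--                 idx = parent
--                 parent //= 2
--
--             heap[idx] = value
--
--     return heap[1:]
-- ===== SOURCE B (Python) =====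
-- def insert_item(heap, value):
--     # Staged reformulation: (1) list the ancestor indices of the new slot
--     # bottom-up, (2) count how many of them (as a prefix) exceed the new value,
--     # (3) build the result as a rotation of the stored values along that path
--     # segment.  Compares return values only (A mutates its argument).
--     n = len(heap)
--     anc = []
--     i = n
--     while i > 0:
--         i = (i - 1) // 2
--         anc.append(i)
--     k = 0
--     while k < len(anc) and value < heap[anc[k]]:
--         k += 1
--     path = [n] + anc[:k]          # bottom-up positions touched by the insert
--     out = heap + [value]
--     for lower, upper in zip(path, path[1:]):
--         out[lower] = heap[upper]  # each touched slot inherits its parent's value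
--     out[path[-1]] = value         # the new value lands at the top of the segment
--     return out
-- ===== Notes on version B (the rewrite author's own statement) =====
-- stated objective: alternative
-- what changed: Replaces A's in-place sift-up loop (front None sentinel, 1-indexed climb, final heap[1:] slice) by staged passes: explicitly list the new slot's ancestor indices, count the prefix of ancestors the value outranks, then build the output as a value rotation along that path segment.
import Mathlib
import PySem

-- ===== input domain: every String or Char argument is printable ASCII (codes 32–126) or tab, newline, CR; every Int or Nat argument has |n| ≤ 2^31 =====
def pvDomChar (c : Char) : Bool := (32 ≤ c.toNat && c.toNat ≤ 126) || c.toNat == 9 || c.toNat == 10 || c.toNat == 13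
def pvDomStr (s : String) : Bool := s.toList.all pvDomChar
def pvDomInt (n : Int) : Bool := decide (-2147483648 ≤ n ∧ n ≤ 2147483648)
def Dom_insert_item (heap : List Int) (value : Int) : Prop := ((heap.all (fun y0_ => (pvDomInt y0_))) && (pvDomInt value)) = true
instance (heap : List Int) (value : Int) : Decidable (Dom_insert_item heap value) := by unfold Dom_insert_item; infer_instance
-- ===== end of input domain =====

-- B replaces A's in-place 1-indexed sift-up loop (insert(0, None) sentinel, final heap[1:]
-- slice) by staged passes: list the new slot's ancestor indices, count the prefix the value
-- outranks, then build the output as a value rotation along that path. Equivalence is about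
-- the RETURN value only (Python A mutates its argument).

-- ===== PORT A =====
-- A's while loop: idx and parent are nonnegative Python ints, always in range, kept as Nat;
-- heap[parent] reads (parent ≥ 1, in range) and heap[idx] = … writes are exact as getD/set here.
def siftA (h : List Int) (idx parent : Nat) (value : Int) : List Int :=
  if hc : parent ≠ 0 ∧ value < h.getD parent 0 then
    siftA (h.set idx (h.getD parent 0)) parent (parent / 2) value
  else
    -- loop exhausted: heap[idx] = value
    h.set idx value
termination_by parent
decreasing_by exact Nat.div_lt_self (Nat.pos_of_ne_zero hc.1) (by omega)

def insert_item (heap : List Int) (value : Int) : List Int :=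
  if heap = [] then heap ++ [value]
  else
    let h1 := heap ++ [value]          -- heap.append(value)
    let idx := h1.length               -- idx = len(heap)
    let h2 := (0 : Int) :: h1          -- heap.insert(0, None): the sentinel cell is never read
                                       -- (parent ≥ 1 at every read) and is dropped by heap[1:];
                                       -- 0 is a placeholder for None
    let parent := idx / 2
    let h3 := if value < h2.getD parent 0 then siftA h2 idx parent value else h2
    PySem.List.slice h3 (some 1) none  -- return heap[1:]

-- ===== PORT B =====
-- Source B stage 1: the while loop collecting the ancestor indices of slot i, bottom-up
def ancChain (i : Nat) : List Nat :=
  if 0 < i then ((i - 1) / 2) :: ancChain ((i - 1) / 2) else []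
termination_by i
decreasing_by omega

-- Source B stage 2: the while loop counting the prefix of ancestors whose value exceeds value
def countK (heap : List Int) (value : Int) : List Nat → Nat
  | [] => 0
  | p :: ps => if value < heap.getD p 0 then countK heap value ps + 1 else 0

def insert_item_alt (heap : List Int) (value : Int) : List Int :=
  let n := heap.length
  let anc := ancChain n
  let k := countK heap value anc
  let path := n :: anc.take k                      -- path = [n] + anc[:k]
  let out := heap ++ [value]
  -- for lower, upper in zip(path, path[1:]): out[lower] = heap[upper]
  let out2 := (path.zip path.tail).foldl (fun o pq => o.set pq.1 (heap.getD pq.2 0)) out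
  out2.set (path.getLastD 0) value                 -- out[path[-1]] = value

-- ===== PRECONDITION & SPEC =====
def Spec_insert_item (heap : List Int) (value : Int) (out : List Int) : Prop := out = insert_item_alt heap value
instance (heap : List Int) (value : Int) (out : List Int) : Decidable (Spec_insert_item heap value out) := by unfold Spec_insert_item; infer_instance

-- ===== CLAIM (what is proved, stated in full; the proofs are below) =====
def Claim_equal_insert_item : Prop := ∀ (heap : List Int) (value : Int), Dom_insert_item heap value → Spec_insert_item heap value (insert_item heap value)

-- ===== LEMMAS AND PROOFS =====

-- Proof-only intermediary: a 0-indexed sift-up (not part of either port); A is bridged to it,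
-- and it is shown equal to B's staged rotation.
def siftM (h : List Int) (i : Nat) (value : Int) : List Int :=
  if hc : 0 < i ∧ value < h.getD ((i - 1) / 2) 0 then
    siftM (h.set i (h.getD ((i - 1) / 2) 0)) ((i - 1) / 2) value
  else
    h.set i value
termination_by i
decreasing_by omega

-- Proof-only intermediary: the rotation written as one recursion over the ancestor chain.
def rotR (heap : List Int) (value : Int) : List Int → Nat → List Nat → List Int
  | o, i, [] => o.set i value
  | o, i, p :: ps =>
    if value < heap.getD p 0 then rotR heap value (o.set i (heap.getD p 0)) p ps
    else o.set i value

-- Bridge 1 (from A's side): A's 1-indexed sift on 0::h is siftM on h at idx-1.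
lemma sift_bridge (idx : Nat) (hidx : 1 ≤ idx) (h : List Int) (v : Int) :
    siftA ((0 : Int) :: h) idx (idx / 2) v = (0 : Int) :: siftM h (idx - 1) v := by
  induction idx using Nat.strong_induction_on generalizing h with
  | _ idx ih =>
    rw [siftA, siftM]
    by_cases h2 : 2 ≤ idx
    · have hp1 : 1 ≤ idx / 2 := by omega
      have hpar : idx / 2 = (idx - 1 - 1) / 2 + 1 := by omega
      have hget : ((0 : Int) :: h).getD (idx / 2) 0 = h.getD ((idx - 1 - 1) / 2) 0 := by
        rw [hpar]; simp
      by_cases hv : v < h.getD ((idx - 1 - 1) / 2) 0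
      · rw [dif_pos ⟨by omega, by rw [hget]; exact hv⟩, dif_pos ⟨by omega, hv⟩]
        have hsetc : ((0 : Int) :: h).set idx (((0 : Int) :: h).getD (idx / 2) 0)
            = (0 : Int) :: h.set (idx - 1) (h.getD ((idx - 1 - 1) / 2) 0) := by
          rw [hget]
          have : idx = (idx - 1) + 1 := by omega
          rw [this]; rfl
        rw [hsetc, ih (idx / 2) (by omega) hp1 _]
        congr 2
        omega
      · rw [dif_neg (by rw [hget]; tauto), dif_neg (by tauto)]
        have : idx = (idx - 1) + 1 := by omega
        rw [this]; rfl
    · have h1 : idx = 1 := by omega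
      subst h1
      rw [dif_neg (by simp), dif_neg (by simp)]
      rfl

lemma set_append_last (xs : List Int) (v : Int) : (xs ++ [v]).set xs.length v = xs ++ [v] := by
  induction xs with
  | nil => rfl
  | cons a t ih => simp [ih]

-- A = siftM on heap ++ [value] at position heap.length
lemma insert_item_eq_sift (heap : List Int) (value : Int) :
    insert_item heap value = siftM (heap ++ [value]) heap.length value := by
  cases heap with
  | nil =>
    rw [insert_item, if_pos rfl, siftM]
    rw [dif_neg (by simp)]
    rfl
  | cons a t =>
    rw [insert_item]
    rw [if_neg (by simp)]
    simp only []
    set h1 : List Int := (a :: t) ++ [value] with hh1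
    have hlen : h1.length = t.length + 2 := by simp [hh1]
    have hidx1 : 1 ≤ h1.length := by omega
    have hsub : h1.length - 1 = ((a :: t) : List Int).length := by simp [hh1]
    by_cases hv : value < ((0 : Int) :: h1).getD (h1.length / 2) 0
    · rw [if_pos hv, sift_bridge h1.length hidx1 h1 value]
      rw [PySem.List.slice_from_one]
      rw [hsub]
      rfl
    · rw [if_neg hv]
      rw [PySem.List.slice_from_one]
      have hpar : h1.length / 2 = (h1.length - 1 - 1) / 2 + 1 := by omega
      have hget : ((0 : Int) :: h1).getD (h1.length / 2) 0
          = h1.getD ((h1.length - 1 - 1) / 2) 0 := by rw [hpar]; simp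
      rw [show siftM h1 (((a :: t) : List Int).length) value
            = siftM h1 (h1.length - 1) value by rw [hsub]]
      rw [siftM, dif_neg (by rw [← hget]; tauto)]
      rw [hsub, hh1, set_append_last]
      rfl

-- Bridge 2: siftM equals the one-pass rotation rotR over the ancestor chain, as long as the
-- evolving list agrees with the original heap below the current position (sift-up only ever
-- writes at or above the current position's descendants).
lemma siftM_eq_rotR (heap : List Int) (value : Int) (i : Nat) (h : List Int)
    (hag : ∀ q, q < i → h.getD q 0 = heap.getD q 0) :
    siftM h i value = rotR heap value h i (ancChain i) := by
  induction i using Nat.strong_induction_on generalizing h with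
  | _ i ih =>
    rw [siftM, ancChain]
    by_cases hi : 0 < i
    · rw [if_pos hi]
      have hlt : (i - 1) / 2 < i := by omega
      have hget : h.getD ((i - 1) / 2) 0 = heap.getD ((i - 1) / 2) 0 := hag _ hlt
      rw [rotR]
      by_cases hv : value < heap.getD ((i - 1) / 2) 0
      · rw [dif_pos ⟨hi, by rw [hget]; exact hv⟩, if_pos hv, hget]
        exact ih _ hlt _ (fun q hq => by
          rw [List.getD_eq_getElem?_getD, List.getElem?_set_ne (by omega),
              ← List.getD_eq_getElem?_getD]
          exact hag q (by omega))
      · rw [dif_neg (by rw [hget]; tauto), if_neg hv]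
    · rw [if_neg hi]
      have : i = 0 := by omega
      subst this
      rw [dif_neg (by simp), rotR]

-- Bridge 3: rotR equals B's staged form (takewhile-count, zip pairs, final write).
lemma rotR_eq_staged (heap : List Int) (value : Int) (chain : List Nat) (o : List Int) (i : Nat) :
    rotR heap value o i chain =
      (((i :: chain.take (countK heap value chain)).zip
          (i :: chain.take (countK heap value chain)).tail).foldl
        (fun o pq => o.set pq.1 (heap.getD pq.2 0)) o).set
        ((i :: chain.take (countK heap value chain)).getLastD 0) value := by
  induction chain generalizing o i with
  | nil => rw [rotR]; rfl
  | cons p ps ih =>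
    rw [rotR, countK]
    by_cases hv : value < heap.getD p 0
    · rw [if_pos hv, if_pos hv]
      rw [List.take_succ_cons]
      have := ih (o.set i (heap.getD p 0)) p
      simpa [List.zip, List.foldl] using this
    · rw [if_neg hv, if_neg hv]
      rfl

lemma append_agrees (heap : List Int) (value : Int) :
    ∀ q, q < heap.length → (heap ++ [value]).getD q 0 = heap.getD q 0 := by
  intro q hq
  rw [List.getD_eq_getElem?_getD, List.getD_eq_getElem?_getD,
      List.getElem?_append_left hq]

-- ===== VERDICT (by name: the statement is the Claim_ definition above) =====
theorem insert_item_spec : Claim_equal_insert_item := by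
  intro heap value _
  unfold Spec_insert_item insert_item_alt
  rw [insert_item_eq_sift,
      siftM_eq_rotR heap value heap.length (heap ++ [value]) (append_agrees heap value),
      rotR_eq_staged]
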